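-- pv_equiv track=rewrite | github.com/ayoni02/DevCareer-DSP-chaneel-codes | October-2025/5th/Thusday/Start with a Vowel/Main.py | insertSpace
-- ===== SOURCE A (Python) =====
-- import string
--
-- def insertSpace(word):
--     word = word.lower().replace(" ", "")
--     word = [letter for letter in word if letter not in string.punctuation]
--     vowels = ["a", "e", "i", "o", "u"]
--     for index in range(len(word)):
--         if word[index] in vowels:
--             word[index] = " " + word[index]
--     return "".join(word)
-- ===== SOURCE B (Python) =====
-- import string
--
-- def insertSpace(word):
--     # Staged whole-string passes: lowercase once, then one str.replace pass per
--     # pattern character (delete each punctuation char and the space, then expand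
--     # each vowel to " "+vowel).  The traversal is driven by the 38 pattern chars,
--     # not by indices into the input; no list is built and no position is mutated.
--     word = word.lower()
--     for p in string.punctuation + " ":
--         word = word.replace(p, "")
--     for v in "aeiou":
--         word = word.replace(v, " " + v)
--     return word
-- ===== Notes on version B (the rewrite author's own statement) =====
-- stated objective: faster
-- what changed: Replaces the list comprehension plus index-mutating vowel loop with staged whole-string str.replace passes, one per pattern character (38 C-level passes over the string instead of one Python-level pass over input positions).
import Mathlib
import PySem

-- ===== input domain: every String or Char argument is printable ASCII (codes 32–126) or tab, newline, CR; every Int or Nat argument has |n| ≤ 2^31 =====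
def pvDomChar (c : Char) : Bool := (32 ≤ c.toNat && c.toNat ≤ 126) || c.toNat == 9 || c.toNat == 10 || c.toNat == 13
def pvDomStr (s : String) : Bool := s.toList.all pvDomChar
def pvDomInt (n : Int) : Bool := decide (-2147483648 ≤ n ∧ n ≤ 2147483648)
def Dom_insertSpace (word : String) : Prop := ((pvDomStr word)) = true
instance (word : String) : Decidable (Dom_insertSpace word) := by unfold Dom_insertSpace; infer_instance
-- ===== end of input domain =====

-- B replaces A's list comprehension + index-mutating vowel loop by staged whole-string
-- str.replace passes, one per pattern character (38 passes; measured faster in a timing run).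

-- ===== PORT A =====
-- string.punctuation
def pvPunct : List Char := "!\"#$%&'()*+,-./:;<=>?@[\\]^_`{|}~".toList

-- vowels = ["a", "e", "i", "o", "u"] (one-char strings, as code-point lists)
def pvVowels : List (List Char) := [['a'], ['e'], ['i'], ['o'], ['u']]

-- loop body:  if word[index] in vowels: word[index] = " " + word[index]
def pvStep (l : List (List Char)) (index : Int) : List (List Char) :=
  if PySem.List.pyGetD l index [] ∈ pvVowels
  then PySem.List.pySetD l index (' ' :: PySem.List.pyGetD l index [])
  else l

def insertSpace (word : String) : String :=
  -- word = word.lower().replace(" ", "")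
  let w : List Char := PySem.Chars.replace (PySem.Chars.lower word.toList) [' '] []
  -- word = [letter for letter in word if letter not in string.punctuation]
  let ws : List (List Char) :=
    (w.map (fun letter => [letter])).filter (fun letter => !PySem.Chars.isIn letter pvPunct)
  -- for index in range(len(word)): …
  let ws2 := (PySem.List.pyRange 0 (ws.length : Int) 1).foldl pvStep ws
  -- return "".join(word)
  String.ofList (PySem.Chars.join [] ws2)

-- ===== PORT B =====
-- one deletion pass: word = word.replace(p, "")
def pvDelPass (w : List Char) (p : Char) : List Char := PySem.Chars.replace w [p] []
-- one vowel pass: word = word.replace(v, " " + v)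
def pvVowPass (w : List Char) (v : Char) : List Char := PySem.Chars.replace w [v] [' ', v]

def insertSpace_alt (word : String) : String :=
  -- word = word.lower(); for p in string.punctuation + " ": word = word.replace(p, "")
  let w1 := (pvPunct ++ [' ']).foldl pvDelPass (PySem.Chars.lower word.toList)
  -- for v in "aeiou": word = word.replace(v, " " + v)
  String.ofList (("aeiou".toList).foldl pvVowPass w1)

-- ===== PRECONDITION & SPEC =====
def Spec_insertSpace (word : String) (out : String) : Prop := out = insertSpace_alt word
instance (word : String) (out : String) : Decidable (Spec_insertSpace word out) := by unfold Spec_insertSpace; infer_instance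

-- ===== CLAIM (what is proved, stated in full; the proofs are below) =====
def Claim_equal_insertSpace : Prop := ∀ (word : String), Dom_insertSpace word → Spec_insertSpace word (insertSpace word)

-- ===== LEMMAS AND PROOFS =====

-- the common per-character table both pipelines reduce to
def pvTrans (c : Char) : List Char :=
  if c ∈ pvPunct ∨ c = ' ' then []
  else if c ∈ ['a', 'e', 'i', 'o', 'u'] then [' ', c]
  else [c]

-- a single-character replace is a per-character substitution
theorem replace_go_single : ∀ (fuel : Nat) (p : Char) (r : List Char) (l acc : List Char), l.length ≤ fuel →
    PySem.Chars.replace.go [p] r fuel l acc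
      = acc.reverse ++ l.flatMap (fun c => if c = p then r else [c]) := by
  intro fuel
  induction fuel with
  | zero =>
    intro p r l acc h
    have : l = [] := by cases l <;> simp_all
    subst this; simp [PySem.Chars.replace.go]
  | succ n ih =>
    intro p r l acc h
    cases l with
    | nil => simp [PySem.Chars.replace.go]
    | cons c t =>
      simp only [PySem.Chars.replace.go]
      by_cases hc : c = p
      · subst hc
        rw [if_pos (by simp [List.isPrefixOf])]
        simp only [List.length_singleton, List.drop_succ_cons, List.drop_zero]
        rw [ih c r t (r.reverse ++ acc) (by simpa using h)]
        simp
      · rw [if_neg (by simp [List.isPrefixOf]; exact fun he => hc he.symm)]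
        rw [ih p r t (c :: acc) (by simpa using h)]
        simp [hc]

theorem replace_single (cs : List Char) (p : Char) (r : List Char) :
    PySem.Chars.replace cs [p] r = cs.flatMap (fun c => if c = p then r else [c]) := by
  rw [PySem.Chars.replace]
  simp [replace_go_single cs.length p r cs [] le_rfl]

-- the deletion passes, folded over the pattern characters, are one filter
theorem del_fold : ∀ (P cs : List Char),
    P.foldl pvDelPass cs = cs.filter (fun c => c ∉ P) := by
  intro P
  induction P with
  | nil => intro cs; simp
  | cons p P ih =>
    intro cs
    have h1 : pvDelPass cs p = cs.filter (fun c => c ≠ p) := by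
      rw [pvDelPass, replace_single]
      induction cs with
      | nil => simp
      | cons c t iht => by_cases hc : c = p <;> simp [hc, iht]
    rw [List.foldl_cons, h1, ih, List.filter_filter]
    apply List.filter_congr
    intro c _
    by_cases hc : c = p <;> simp [hc]

-- the vowel passes, folded over distinct non-space vowels, are one substitution
theorem vow_fold : ∀ (V cs : List Char), V.Nodup → ' ' ∉ V →
    V.foldl pvVowPass cs = cs.flatMap (fun c => if c ∈ V then [' ', c] else [c]) := by
  intro V
  induction V with
  | nil => intro cs _ _; simp
  | cons v V ih =>
    intro cs hnd hsp
    have hvV : v ∉ V := (List.nodup_cons.mp hnd).1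
    have hndV : V.Nodup := (List.nodup_cons.mp hnd).2
    have hspv : ' ' ≠ v := fun h => hsp (h ▸ List.mem_cons_self ..)
    have hspV : ' ' ∉ V := fun h => hsp (List.mem_cons_of_mem _ h)
    rw [List.foldl_cons]
    have h1 : pvVowPass cs v = cs.flatMap (fun c => if c = v then [' ', v] else [c]) :=
      replace_single cs v [' ', v]
    rw [h1, ih _ hndV hspV, List.flatMap_assoc]
    apply List.flatMap_congr  -- pointwise
    intro c _
    by_cases hc : c = v
    · subst hc
      simp [hspV, hvV]
    · by_cases hm : c ∈ V <;> simp [hc, hm]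

-- filter-then-flatMap fuses into one flatMap
theorem filter_flatMap (cs : List Char) (p : Char → Bool) (g : Char → List Char) :
    (cs.filter p).flatMap g = cs.flatMap (fun c => if p c then g c else []) := by
  induction cs with
  | nil => simp
  | cons c t ih => by_cases hc : p c <;> simp [hc, ih]

-- B's whole pipeline after lower() is the per-character table
theorem alt_pipeline (cs : List Char) :
    ("aeiou".toList).foldl pvVowPass ((pvPunct ++ [' ']).foldl pvDelPass cs)
      = cs.flatMap pvTrans := by
  rw [del_fold, vow_fold _ _ (by decide) (by decide), filter_flatMap]
  apply List.flatMap_congr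
  intro c _
  by_cases hd : c ∈ pvPunct ++ [' ']
  · have : c ∈ pvPunct ∨ c = ' ' := by simpa using hd
    simp [hd, pvTrans, this]
  · have h2 : ¬ (c ∈ pvPunct ∨ c = ' ') := by simpa using hd
    simp only [pvTrans, if_neg h2]
    simp [hd]

-- ——— A-side lemmas ———

-- A's `.replace(" ", "")` deletes exactly the spaces
theorem replace_space (cs : List Char) : PySem.Chars.replace cs [' '] [] = cs.filter (· ≠ ' ') := by
  rw [replace_single]
  induction cs with
  | nil => simp
  | cons c t ih => by_cases hc : c = ' ' <;> simp [hc, ih]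

def pvF (l : List Char) : List Char := if l ∈ pvVowels then ' ' :: l else l

-- A's index loop rewrites each position independently: it is a map
theorem fold_set_map : ∀ (t pre : List (List Char)),
    (PySem.List.pyRange pre.length (pre.length + t.length) 1).foldl pvStep (pre ++ t)
      = pre ++ t.map pvF := by
  intro t
  induction t with
  | nil => intro pre; simp [PySem.List.pyRange]
  | cons x t ih =>
    intro pre
    rw [PySem.List.pyRange_one_cons (by push_cast [List.length_cons]; omega)]
    simp only [List.foldl_cons]
    have hget : PySem.List.pyGetD (pre ++ x :: t) (pre.length : Int) [] = x := by
      rw [PySem.List.pyGetD_natCast]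
      simp [List.getD_eq_getElem?_getD]
    have hset : pvStep (pre ++ x :: t) (pre.length : Int) = pre ++ pvF x :: t := by
      unfold pvStep pvF
      rw [hget]
      split
      · rw [PySem.List.pySetD_natCast]
        rw [List.set_append_right _ _ (Nat.le_refl _)]
        simp
      · rfl
    rw [hset]
    have hrw : pre ++ pvF x :: t = (pre ++ [pvF x]) ++ t := by simp
    have hlen : ((pre.length : Int) + 1) = ((pre ++ [pvF x]).length : Int) := by
      simp
    have hlen2 : ((pre.length : Int) + (x :: t).length) = ((pre ++ [pvF x]).length : Int) + t.length := by
      push_cast [List.length_cons, List.length_append, List.length_singleton]; simp; ring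
    rw [hrw, hlen2, hlen, ih (pre ++ [pvF x])]
    simp

-- "".join is flatten
theorem join_nil_flatten (xs : List (List Char)) : PySem.Chars.join [] xs = xs.flatten := by
  induction xs with
  | nil => simp [PySem.Chars.join_nil]
  | cons x t ih =>
    cases t with
    | nil => simp [PySem.Chars.join_singleton]
    | cons y u => rw [PySem.Chars.join_cons_cons]; simp_all

-- one-char-string membership in string.punctuation is char membership
theorem singleton_isIn_iff (c : Char) (s : List Char) :
    PySem.Chars.isIn [c] s = true ↔ c ∈ s := by
  rw [PySem.Chars.isIn_iff_infix]
  constructor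
  · exact fun h => h.subset (List.mem_singleton_self c)
  · intro h
    obtain ⟨l, r, rfl⟩ := List.append_of_mem h
    exact ⟨l, r, by simp⟩

-- A's two filters followed by the vowel map collapse to the per-character table
theorem filters_flatMap (cs : List Char) :
    (((cs.filter (· ≠ ' ')).filter (fun c => !PySem.Chars.isIn [c] pvPunct)).map
        (fun c => pvF [c])).flatten
      = cs.flatMap pvTrans := by
  induction cs with
  | nil => simp
  | cons c t ih =>
    rw [List.flatMap_cons, ← ih]
    by_cases hsp : c = ' '
    · subst hsp
      rw [List.filter_cons_of_neg (by simp)]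
      rw [show pvTrans ' ' = [] from by decide]
      simp
    · rw [List.filter_cons_of_pos (by simpa using hsp)]
      by_cases hp : c ∈ pvPunct
      · rw [List.filter_cons_of_neg (by simp [(singleton_isIn_iff c pvPunct).mpr hp])]
        rw [show pvTrans c = [] from by unfold pvTrans; rw [if_pos (Or.inl hp)]]
        simp
      · have hni : PySem.Chars.isIn [c] pvPunct = false := by
          rcases Bool.eq_false_or_eq_true (PySem.Chars.isIn [c] pvPunct) with h | h
          · exact absurd ((singleton_isIn_iff c pvPunct).mp h) hp
          · exact h
        have hvow : ([c] ∈ pvVowels) ↔ c ∈ (['a', 'e', 'i', 'o', 'u'] : List Char) := by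
          simp [pvVowels]
        rw [List.filter_cons_of_pos (by simp [hni])]
        rw [List.map_cons, List.flatten_cons]
        congr 1
        unfold pvF pvTrans
        rw [if_neg (show ¬(c ∈ pvPunct ∨ c = ' ') from fun h => h.elim hp hsp)]
        by_cases hv : c ∈ (['a', 'e', 'i', 'o', 'u'] : List Char)
        · rw [if_pos (hvow.mpr hv), if_pos hv]
        · rw [if_neg (show ¬([c] ∈ pvVowels) from fun h => hv (hvow.mp h)), if_neg hv]

-- the index loop starting at 0, as A runs it
theorem fold_set_map0 (t : List (List Char)) :
    (PySem.List.pyRange 0 (t.length : Int) 1).foldl pvStep t = t.map pvF := by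
  have h := fold_set_map t []
  simpa using h

-- ===== VERDICT (by name: the statement is the Claim_ definition above) =====
theorem insertSpace_spec : Claim_equal_insertSpace := by
  intro word _
  unfold Spec_insertSpace insertSpace insertSpace_alt
  simp only [alt_pipeline]
  simp only [replace_space, List.filter_map, fold_set_map0, join_nil_flatten, List.map_map]
  exact congrArg String.ofList
    (by simpa [Function.comp] using filters_flatMap (PySem.Chars.lower word.toList))
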